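-- pv_equiv track=rewrite | github.com/vishwaspuriofficial/Coding-Practice | Code Signal/1. Intro/9. Dark Wilderness/41. digitDegree.py | solution
-- ===== SOURCE A (Python) =====
-- def solution(n):
--     def sumOf(n):
--         a = 0
--         for i in n:
--             a += int(i)
--
--         return str(a)
--
--     count = 0
--     n = str(n)
--     while len(n) != 1:
--         n = sumOf(n)
--         count += 1
--     return count
-- ===== SOURCE B (Python) =====
-- def solution(n):
--     # digit degree, recursively: digit sum computed without extracting digits,
--     # via the identity sum_of_digits(n) = n - 9 * sum_{k>=1} n // 10**k
--     if n < 10: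
--         return 0
--     s = n
--     p = 10
--     while p <= n:
--         s -= 9 * (n // p)
--         p *= 10
--     return 1 + solution(s)
-- ===== Notes on version B (the rewrite author's own statement) =====
-- stated objective: alternative
-- what changed: B is recursive instead of a counting while-loop, and it never extracts digits at all: it computes each digit sum by the casting-out-nines identity sum_of_digits(n) = n - 9*sum_{k>=1} n//10**k, accumulated over powers of ten, instead of A's char-by-char int() summation over str(n).
import Mathlib
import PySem

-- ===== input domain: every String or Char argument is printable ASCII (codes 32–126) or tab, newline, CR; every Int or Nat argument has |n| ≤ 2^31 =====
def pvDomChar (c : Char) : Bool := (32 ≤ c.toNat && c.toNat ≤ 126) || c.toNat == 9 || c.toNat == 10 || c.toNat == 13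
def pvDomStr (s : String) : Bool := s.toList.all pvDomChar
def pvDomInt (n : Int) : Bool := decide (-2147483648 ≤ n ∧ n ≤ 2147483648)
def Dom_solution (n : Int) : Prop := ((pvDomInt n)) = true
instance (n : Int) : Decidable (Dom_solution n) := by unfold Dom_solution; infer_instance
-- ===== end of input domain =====

-- B is recursive and computes each digit sum without extracting digits, via
-- sum_of_digits(n) = n - 9*Σ_{k≥1} n//10^k; equivalence proved for n ≥ 0
-- (A raises ValueError on negative n).

-- ===== PORT A =====
-- sumOf: a = 0; for i in n: a += int(i); return str(a).
-- int(i) is PySem.Int.ofStr? on the one-character string; `.getD 0` only totalizes the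
-- port — Pre_solution (0 ≤ n) excludes every input on which int(i) would raise.
def sumOfA (s : String) : String :=
  PySem.Int.toStr
    (s.toList.foldl (fun a c => a + (PySem.Int.ofStr? (String.singleton c)).getD 0) 0)

-- while len(n) != 1: n = sumOf(n); count += 1   (fuel only makes the loop total; 64 is
-- never exhausted on the admitted domain)
def loopA : Nat → String → Int → Int
  | 0, _, count => count
  | f + 1, s, count =>
      if PySem.Str.len s ≠ 1 then loopA f (sumOfA s) (count + 1) else count

def solution (n : Int) : Int := loopA 64 (PySem.Int.toStr n) 0

-- ===== PORT B =====
-- inner while p <= n: s -= 9 * (n // p); p *= 10   (fuel only totalizes)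
def innerB : Nat → Int → Int → Int → Int
  | 0, _, _, s => s
  | f + 1, n, p, s =>
      if p ≤ n then innerB f n (p * 10) (s - 9 * PySem.Int.floordiv n p) else s

-- if n < 10: return 0; …; return 1 + solution(s)   (fuel only totalizes the recursion)
def solB : Nat → Int → Int
  | 0, _ => 0
  | f + 1, n => if n < 10 then 0 else 1 + solB f (innerB 64 n 10 n)

def solution_alt (n : Int) : Int := solB 64 n

-- ===== PRECONDITION & SPEC =====
-- A raises ValueError on every negative n (it tries int('-') on the sign character).
def Pre_solution (n : Int) : Prop := 0 ≤ n
instance (n : Int) : Decidable (Pre_solution n) := by unfold Pre_solution; infer_instance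
def pvWitness_solution : Int := 12

def Spec_solution (n : Int) (out : Int) : Prop := out = solution_alt n
instance (n : Int) (out : Int) : Decidable (Spec_solution n out) := by
  unfold Spec_solution; infer_instance

-- ===== CLAIM (what is proved, stated in full; the proofs are below) =====
def Claim_equal_solution : Prop :=
  ∀ (n : Int), Dom_solution n → Pre_solution n → Spec_solution n (solution n)

-- ===== LEMMAS AND PROOFS =====

-- Proof-side characterisation of Nat.toDigits 10 (most significant digit first).
def pvDig (m : Nat) : List Char :=
  if _h : m < 10 then [Nat.digitChar m]
  else pvDig (m / 10) ++ [Nat.digitChar (m % 10)]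
  decreasing_by exact Nat.div_lt_self (by omega) (by omega)

theorem pvCore_shift (b : Nat) :
    ∀ (f n : Nat) (l : List Char),
      Nat.toDigitsCore b f n l = Nat.toDigitsCore b f n [] ++ l := by
  intro f
  induction f with
  | zero => intro n l; simp [Nat.toDigitsCore]
  | succ f ih =>
      intro n l
      simp only [Nat.toDigitsCore]
      split
      · rfl
      · rw [ih (n / b) [Nat.digitChar (n % b)], ih (n / b) (Nat.digitChar (n % b) :: l),
          List.append_assoc]
        rfl

theorem pvCore_eq_dig : ∀ (f n : Nat), n < f → Nat.toDigitsCore 10 f n [] = pvDig n := by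
  intro f
  induction f with
  | zero => omega
  | succ f ih =>
      intro n hn
      simp only [Nat.toDigitsCore]
      by_cases h : n / 10 = 0
      · rw [pvDig]; simp [h, Nat.mod_eq_of_lt (by omega : n < 10), if_pos (by omega : n < 10)]
      · rw [if_neg h, pvCore_shift, ih (n / 10) (by omega)]
        conv_rhs => rw [pvDig, dif_neg (show ¬ n < 10 by omega)]

theorem pvToDigits_eq_dig (n : Nat) : Nat.toDigits 10 n = pvDig n :=
  pvCore_eq_dig (n + 1) n (by omega)

theorem pvToChars_nat (m : Nat) : PySem.Int.toChars (m : Int) = pvDig m := by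
  simp [PySem.Int.toChars, pvToDigits_eq_dig]

theorem pvDig_length_one_iff (m : Nat) : (pvDig m).length = 1 ↔ m < 10 := by
  rw [pvDig]
  by_cases h : m < 10
  · simp [h]
  · rw [dif_neg h]
    have : 1 ≤ (pvDig (m / 10)).length := by
      rw [pvDig]; split <;> simp
    simp only [List.length_append, List.length_singleton]
    omega

theorem pvDigitChar_val (d : Nat) (hd : d < 10) :
    (PySem.Int.ofStr? (String.singleton (Nat.digitChar d))).getD 0 = (d : Int) := by
  interval_cases d <;> decide

theorem pvFold_dig (m : Nat) :
    ∀ (a : Int),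
      (pvDig m).foldl (fun a c => a + (PySem.Int.ofStr? (String.singleton c)).getD 0) a
        = a + ((Nat.digits 10 m).sum : Int) := by
  induction m using Nat.strong_induction_on with
  | _ m ih =>
      intro a
      rw [pvDig]
      by_cases h : m < 10
      · rw [dif_pos h]
        rcases Nat.eq_zero_or_pos m with h0 | h0
        · subst h0; simp [List.foldl, pvDigitChar_val 0 (by omega)]
        · simp [List.foldl, pvDigitChar_val m h,
            Nat.digits_def' (by omega : 1 < 10) h0, Nat.div_eq_of_lt h,
            Nat.mod_eq_of_lt h]
      · rw [dif_neg h, List.foldl_append,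
          ih (m / 10) (Nat.div_lt_self (by omega) (by omega)) a]
        simp [List.foldl, pvDigitChar_val (m % 10) (Nat.mod_lt m (by omega)),
          Nat.digits_def' (by omega : 1 < 10) (by omega : 0 < m)]
        ring

theorem pvSumOfA_eq (m : Nat) :
    sumOfA (PySem.Int.toStr (m : Int)) = PySem.Int.toStr ((Nat.digits 10 m).sum : Int) := by
  unfold sumOfA
  rw [PySem.Int.toList_toStr, pvToChars_nat, pvFold_dig m 0, zero_add]

theorem pvStrLen_nat (m : Nat) :
    PySem.Str.len (PySem.Int.toStr (m : Int)) = ((pvDig m).length : Int) := by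
  rw [PySem.Str.len_eq, PySem.Int.toList_toStr, pvToChars_nat]

-- T m = Σ_{k≥1} m / 10^k (proof-side)
def pvT (m : Nat) : Nat :=
  if _h : m = 0 then 0 else m / 10 + pvT (m / 10)
  decreasing_by exact Nat.div_lt_self (by omega) (by omega)

theorem pvT_eq (m : Nat) : pvT m = m / 10 + pvT (m / 10) := by
  rw [pvT]
  split
  · rename_i h; subst h; rw [pvT]; simp
  · rfl

theorem pvSumdig_eq (m : Nat) :
    ((Nat.digits 10 m).sum : Int) = (m : Int) - 9 * (pvT m : Int) := by
  induction m using Nat.strong_induction_on with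
  | _ m ih =>
      rcases Nat.eq_zero_or_pos m with h0 | h0
      · subst h0; simp [pvT]
      · rw [Nat.digits_def' (by omega : 1 < 10) h0, List.sum_cons, Nat.cast_add,
          ih (m / 10) (Nat.div_lt_self h0 (by omega)), pvT_eq m]
        have hmd : m % 10 + 10 * (m / 10) = m := Nat.mod_add_div m 10
        push_cast
        omega

-- proof-side image of B's inner loop
def pvG : Nat → Nat → Nat → Nat
  | 0, _, _ => 0
  | f + 1, m, p => if p ≤ m then m / p + pvG f m (p * 10) else 0

theorem pvInnerB_eq :
    ∀ (f : Nat) (m p : Nat) (s : Int),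
      innerB f (m : Int) (p : Int) s = s - 9 * (pvG f m p : Int) := by
  intro f
  induction f with
  | zero => intro m p s; simp [innerB, pvG]
  | succ f ih =>
      intro m p s
      rw [innerB, pvG]
      by_cases h : p ≤ m
      · rw [if_pos (by exact_mod_cast h), if_pos h]
        rw [show ((p : Int) * 10) = ((p * 10 : Nat) : Int) by push_cast; ring,
          show PySem.Int.floordiv (m : Int) (p : Int) = ((m / p : Nat) : Int) from
            PySem.Int.floordiv_natCast m p,
          ih m (p * 10)]
        push_cast
        ring
      · rw [if_neg (by exact_mod_cast h), if_neg h]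
        simp

theorem pvT_eq_zero (m : Nat) (h : m < 10) : pvT m = 0 := by
  rw [pvT_eq, Nat.div_eq_of_lt h]
  rw [pvT]; simp

theorem pvG_eq :
    ∀ (f m p : Nat), 0 < p → m < p * 10 ^ f →
      pvG f m p = if p ≤ m then m / p + pvT (m / p) else 0 := by
  intro f
  induction f with
  | zero =>
      intro m p hp hm
      rw [pvG, if_neg (by simp at hm; omega)]
  | succ f ih =>
      intro m p hp hm
      rw [pvG]
      by_cases h : p ≤ m
      · rw [if_pos h, if_pos h,
          ih m (p * 10) (by omega) (by
            rw [pow_succ, ← mul_assoc] at hm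
            rw [mul_right_comm]
            exact hm)]
        by_cases h10 : p * 10 ≤ m
        · rw [if_pos h10, ← Nat.div_div_eq_div_mul m p 10, pvT_eq (m / p)]
        · rw [if_neg h10,
            pvT_eq_zero (m / p) ((Nat.div_lt_iff_lt_mul hp).mpr (by omega))]
      · rw [if_neg h, if_neg h]

theorem pvInner_is_sumdig (m : Nat) (h10 : 10 ≤ m) (hm : m < 10 ^ 65) :
    innerB 64 (m : Int) 10 (m : Int) = ((Nat.digits 10 m).sum : Int) := by
  have h1 : innerB 64 (m : Int) ((10 : Nat) : Int) (m : Int)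
      = (m : Int) - 9 * (pvG 64 m 10 : Int) := pvInnerB_eq 64 m 10 (m : Int)
  have h2 : pvG 64 m 10 = m / 10 + pvT (m / 10) := by
    rw [pvG_eq 64 m 10 (by omega) (by
      calc m < 10 ^ 65 := hm
        _ = 10 * 10 ^ 64 := by ring), if_pos h10]
  rw [show ((10 : Nat) : Int) = (10 : Int) by norm_num] at h1
  rw [h1, h2, ← pvT_eq, pvSumdig_eq]

theorem pvB3 : ∀ m < 16, 10 ≤ m → (Nat.digits 10 m).sum < 8 := by decide
theorem pvB4 : ∀ m < 32, 10 ≤ m → (Nat.digits 10 m).sum < 16 := by decide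
theorem pvB5 : ∀ m < 64, (Nat.digits 10 m).sum < 32 := by decide
theorem pvB6 : ∀ m < 128, (Nat.digits 10 m).sum < 64 := by decide

theorem pvNine : ∀ f, 7 ≤ f → 9 * (f + 1) < 2 ^ f := by
  intro f hf
  induction f, hf using Nat.le_induction with
  | base => norm_num
  | succ f hf ih => rw [pow_succ]; omega

theorem pvSum_le_9len (m : Nat) :
    (Nat.digits 10 m).sum ≤ 9 * (Nat.digits 10 m).length := by
  calc (Nat.digits 10 m).sum ≤ (Nat.digits 10 m).length * 9 := by
        apply List.sum_le_card_nsmul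
        intro x hx
        have := Nat.digits_lt_base (by omega) hx
        omega
    _ = 9 * (Nat.digits 10 m).length := by ring

theorem pvSumdig_lt (f m : Nat) (h10 : 10 ≤ m) (hm : m < 2 ^ (f + 1)) :
    (Nat.digits 10 m).sum < 2 ^ f := by
  have hf3 : 3 ≤ f := by
    by_contra h
    interval_cases f <;> omega
  rcases Nat.lt_or_ge f 7 with h7 | h7
  · interval_cases f
    · exact pvB3 m (by norm_num at hm; omega) h10
    · exact pvB4 m (by norm_num at hm; omega) h10
    · exact pvB5 m (by norm_num at hm; omega)
    · exact pvB6 m (by norm_num at hm; omega)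
  · have hlen : (Nat.digits 10 m).length = Nat.log 10 m + 1 :=
      Nat.length_digits 10 m (by omega) (by omega)
    have hlog2 : Nat.log 2 m < f + 1 := Nat.log_lt_of_lt_pow (by omega) hm
    have hlog : Nat.log 10 m ≤ Nat.log 2 m := Nat.log_anti_left (by omega) (by omega)
    have h9 := pvSum_le_9len m
    have h99 : 9 * (Nat.digits 10 m).length ≤ 9 * (f + 1) := by
      rw [hlen]; omega
    have := pvNine f h7
    omega

theorem pvLoop_eq :
    ∀ (f : Nat) (m : Nat) (count : Int), f ≤ 64 → m < 2 ^ f →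
      loopA f (PySem.Int.toStr (m : Int)) count = count + solB f (m : Int) := by
  intro f
  induction f with
  | zero => intro m count _ _; simp [loopA, solB]
  | succ f ih =>
      intro m count hf hm
      rw [loopA, solB]
      by_cases h : m < 10
      · rw [if_neg (by
            rw [pvStrLen_nat, (pvDig_length_one_iff m).mpr h]
            simp),
          if_pos (by exact_mod_cast h)]
        ring
      · have hlen : PySem.Str.len (PySem.Int.toStr (m : Int)) ≠ 1 := by
          rw [pvStrLen_nat]
          intro hc
          exact h ((pvDig_length_one_iff m).mp (by exact_mod_cast hc))
        rw [if_pos hlen, if_neg (by exact_mod_cast (by omega : ¬ (m : Int) < 10)),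
          pvSumOfA_eq,
          pvInner_is_sumdig m (by omega) (by
            calc m < 2 ^ (f + 1) := hm
              _ ≤ 2 ^ 65 := Nat.pow_le_pow_right (by omega) (by omega)
              _ < 10 ^ 65 := Nat.pow_lt_pow_left (by omega) (by omega)),
          ih ((Nat.digits 10 m).sum) (count + 1) (by omega)
            (pvSumdig_lt f m (by omega) hm)]
        ring

-- ===== VERDICT (by name: the statement is the Claim_ definition above) =====
theorem solution_spec : Claim_equal_solution := by
  intro n hdom hpre
  unfold Spec_solution solution solution_alt
  have hn : n = ((n.toNat : Nat) : Int) := (Int.toNat_of_nonneg hpre).symm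
  rw [hn, pvLoop_eq 64 n.toNat 0 le_rfl (by
    unfold Dom_solution pvDomInt at hdom
    have hb : n ≤ 2147483648 := (of_decide_eq_true hdom).2
    have : n.toNat ≤ 2147483648 := by omega
    calc n.toNat ≤ 2147483648 := this
      _ < 2 ^ 64 := by norm_num), zero_add]
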